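-- pv_equiv track=rewrite | github.com/rjcasi/bugbot-agent | topology/detectors.py | is_hausdorff
-- ===== SOURCE A (Python) =====
-- from typing import Any, Dict, List, Optional, Set
--
-- def is_hausdorff(points: Set[Any], open_sets: List[Set[Any]]) -> bool:
--     pts = list(points)
--     n = len(pts)
--     for i in range(n):
--         for j in range(i + 1, n):
--             if not separable(pts[i], pts[j], open_sets):
--                 return False
--     return True
--
-- def separable(x: Any, y: Any, open_sets: List[Set[Any]]) -> bool:
--     containing_x = [U for U in open_sets if x in U]
--     containing_y = [V for V in open_sets if y in V]
--     for U in containing_x: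
--         for V in containing_y:
--             if U.isdisjoint(V):
--                 return True
--     return False
-- ===== SOURCE B (Python) =====
-- def is_hausdorff(points, open_sets):
--     # Build once: each point -> the open sets containing it; then check all unordered
--     # pairs by recursion on the suffixes of the point list.
--     pts = list(points)
--     idx = {p: [U for U in open_sets if p in U] for p in pts}
--     def ok(rest):
--         if not rest:
--             return True
--         x, tail = rest[0], rest[1:]
--         return all(any(not (U & V) for U in idx[x] for V in idx[y]) for y in tail) and ok(tail)
--     return ok(pts)
-- ===== Notes on version B (the rewrite author's own statement) =====
-- stated objective: alternative
-- what changed: B precomputes a dict mapping each point to the open sets containing it (one scan of open_sets per point) and then checks all unordered pairs by recursing over suffixes of the point list, instead of A's index-based double loop that rescans open_sets twice inside every separable call.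
import Mathlib
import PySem

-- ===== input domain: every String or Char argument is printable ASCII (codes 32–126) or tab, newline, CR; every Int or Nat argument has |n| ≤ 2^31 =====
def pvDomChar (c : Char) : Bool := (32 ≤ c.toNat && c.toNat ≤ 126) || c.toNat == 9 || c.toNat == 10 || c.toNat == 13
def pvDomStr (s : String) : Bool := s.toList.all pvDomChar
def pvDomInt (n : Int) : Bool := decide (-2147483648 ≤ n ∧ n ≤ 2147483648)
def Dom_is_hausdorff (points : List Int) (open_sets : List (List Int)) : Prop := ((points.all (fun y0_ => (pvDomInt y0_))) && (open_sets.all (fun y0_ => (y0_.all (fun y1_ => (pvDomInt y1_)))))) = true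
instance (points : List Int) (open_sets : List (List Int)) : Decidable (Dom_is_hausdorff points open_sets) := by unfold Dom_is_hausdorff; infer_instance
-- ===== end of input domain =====

-- B builds a per-point membership index once and recurses over suffixes of the point
-- list instead of rescanning open_sets for every pair of index positions (objective: alternative).

-- ===== PORT A =====
-- helper `separable` of A: scan open_sets twice per call, then nested early-return loops
def pySeparable (x y : Int) (open_sets : List (List Int)) : Bool :=
  let containing_x := open_sets.filter (fun U : List Int => U.contains x)
  let containing_y := open_sets.filter (fun V : List Int => V.contains y)
  containing_x.any (fun U => containing_y.any (fun V => U.all (fun a : Int => !V.contains a)))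

def is_hausdorff (points : List Int) (open_sets : List (List Int)) : Bool :=
  let pts := points
  let n : Int := (pts.length : Int)
  (PySem.List.pyRange 0 n 1).all (fun i =>
    (PySem.List.pyRange (i + 1) n 1).all (fun j =>
      pySeparable (PySem.List.pyGetD pts i 0) (PySem.List.pyGetD pts j 0) open_sets))

-- ===== PORT B =====
-- membership index: point ↦ the open sets containing it (built once)
def pvIndex (pts : List Int) (os : List (List Int)) : PySem.Dict Int (List (List Int)) :=
  pts.foldl (fun d p => d.insert p (os.filter (fun U : List Int => U.contains p))) PySem.Dict.empty

def pvSep (idx : PySem.Dict Int (List (List Int))) (x y : Int) : Bool :=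
  (idx.getD x []).any (fun U => (idx.getD y []).any (fun V =>
    (U.filter (fun a : Int => V.contains a)).isEmpty))

def pvOk (idx : PySem.Dict Int (List (List Int))) : List Int → Bool
  | [] => true
  | x :: tail => tail.all (fun y => pvSep idx x y) && pvOk idx tail

def is_hausdorff_alt (points : List Int) (open_sets : List (List Int)) : Bool :=
  let pts := points
  let idx := pvIndex pts open_sets
  pvOk idx pts

-- ===== PRECONDITION & SPEC =====
def Spec_is_hausdorff (points : List Int) (open_sets : List (List Int)) (out : Bool) : Prop := out = is_hausdorff_alt points open_sets
instance (points : List Int) (open_sets : List (List Int)) (out : Bool) : Decidable (Spec_is_hausdorff points open_sets out) := by unfold Spec_is_hausdorff; infer_instance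

-- ===== CLAIM (what is proved, stated in full; the proofs are below) =====
def Claim_equal_is_hausdorff : Prop := ∀ (points : List Int) (open_sets : List (List Int)), Dom_is_hausdorff points open_sets → Spec_is_hausdorff points open_sets (is_hausdorff points open_sets)

-- ===== LEMMAS AND PROOFS =====

theorem pvIndex_foldl_getD (os : List (List Int)) (pts : List Int)
    (d : PySem.Dict Int (List (List Int))) (x : Int) :
    (pts.foldl (fun d p => d.insert p (os.filter (fun U : List Int => U.contains p))) d).getD x []
      = if x ∈ pts then os.filter (fun U : List Int => U.contains x) else d.getD x [] := by
  induction pts generalizing d with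
  | nil => simp
  | cons p rest ih =>
    simp only [List.foldl_cons, ih, List.mem_cons]
    by_cases hx : x ∈ rest
    · simp [hx]
    · by_cases hxp : x = p
      · subst hxp; simp [hx, PySem.Dict.getD_insert_self]
      · rw [PySem.Dict.getD_insert]
        simp [hx, hxp]

theorem isEmpty_filter_eq_all (U V : List Int) :
    (List.filter (fun a => decide (a ∈ V)) U).isEmpty = U.all (fun a => !decide (a ∈ V)) := by
  induction U with
  | nil => rfl
  | cons a t ih => by_cases h : a ∈ V <;> simp [h, ih]

theorem pvSep_eq (pts : List Int) (os : List (List Int)) (x y : Int)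
    (hx : x ∈ pts) (hy : y ∈ pts) :
    pvSep (pvIndex pts os) x y = pySeparable x y os := by
  unfold pvSep pvIndex pySeparable
  rw [pvIndex_foldl_getD, pvIndex_foldl_getD]
  simp only [hx, hy, if_pos, List.contains_eq_mem]
  exact congrArg _ (funext fun U => congrArg _ (funext fun V => isEmpty_filter_eq_all U V))

theorem pvOk_iff (idx : PySem.Dict Int (List (List Int))) (pts : List Int) :
    pvOk idx pts = true ↔ pts.Pairwise (fun a b => pvSep idx a b = true) := by
  induction pts with
  | nil => simp [pvOk]
  | cons x t ih => simp [pvOk, ih, List.all_eq_true, List.pairwise_cons, and_comm]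

theorem is_hausdorff_iff (pts : List Int) (os : List (List Int)) :
    is_hausdorff pts os = true ↔
      ∀ (i j : Nat) (hi : i < pts.length) (hj : j < pts.length), i < j →
        pySeparable pts[i] pts[j] os = true := by
  unfold is_hausdorff
  simp only [List.all_eq_true, PySem.List.mem_pyRange_one]
  constructor
  · intro h i j hi hj hij
    have h1 := h (i : Int) ⟨by omega, by exact_mod_cast hi⟩ (j : Int)
      ⟨by exact_mod_cast hij, by exact_mod_cast hj⟩
    simpa [PySem.List.pyGetD_natCast, List.getD_eq_getElem?_getD,
      List.getElem?_eq_getElem hi, List.getElem?_eq_getElem hj] using h1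
  · intro h i ⟨hi0, hin⟩ j ⟨hji, hjn⟩
    have hj0 : (0 : Int) ≤ j := by omega
    obtain ⟨i', rfl⟩ : ∃ k : Nat, i = (k : Int) := ⟨i.toNat, (Int.toNat_of_nonneg hi0).symm⟩
    obtain ⟨j', rfl⟩ : ∃ k : Nat, j = (k : Int) := ⟨j.toNat, (Int.toNat_of_nonneg hj0).symm⟩
    have hi' : i' < pts.length := by exact_mod_cast hin
    have hj' : j' < pts.length := by exact_mod_cast hjn
    have hij : i' < j' := by exact_mod_cast (by omega : (i' : Int) < j')
    have h1 := h i' j' hi' hj' hij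
    simpa [PySem.List.pyGetD_natCast, List.getD_eq_getElem?_getD,
      List.getElem?_eq_getElem hi', List.getElem?_eq_getElem hj'] using h1

-- ===== VERDICT (by name: the statement is the Claim_ definition above) =====
theorem is_hausdorff_spec : Claim_equal_is_hausdorff := by
  intro pts os _
  unfold Spec_is_hausdorff is_hausdorff_alt
  rw [Bool.eq_iff_iff, is_hausdorff_iff, pvOk_iff, List.pairwise_iff_getElem]
  constructor
  · intro h i j hi hj hij
    rw [pvSep_eq pts os _ _ (pts.getElem_mem hi) (pts.getElem_mem hj)]
    exact h i j hi hj hij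
  · intro h i j hi hj hij
    have := h i j hi hj hij
    rwa [pvSep_eq pts os _ _ (pts.getElem_mem hi) (pts.getElem_mem hj)] at this
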